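-- pv_equiv track=rewrite | github.com/dbmi-bgm/cgap-portal | src/encoded/ingestion/table_utils.py | process_fields
-- ===== SOURCE A (Python) =====
-- class MappingTableIntakeException(Exception):
--     """ Specific type of exception we'd like to throw if we fail in this stage
--         due to an error with the table itself
--     """
--     pass
--
-- def process_fields(row):
--     """ Takes in the row of field names and processes them. At this point fields are all
--         lowercased and use underscores, such as 'field_name'
--
--     Args:
--         row: row of fields to be processed from the mapping table
--
--     Raises:
--         MappingTableIntakeException if a duplicate field is detected or no fields
--         are detected
--
--     Returns:
--         list of fields
--     """
--     fields = {}
--     for name in row: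
--         if name not in fields:
--             fields[name] = True
--         else:
--             raise MappingTableIntakeException('Found duplicate field in %s' % row)
--     if not fields:
--         raise MappingTableIntakeException('Did not find any fields on row %s' % row)
--     return fields.keys()
-- ===== SOURCE B (Python) =====
-- class MappingTableIntakeException(Exception):
--     pass
--
-- def _has_adjacent_dup(ordered):
--     for a, b in zip(ordered, ordered[1:]):
--         if a == b:
--             return True
--     return False
--
-- def process_fields(row):
--     fields = list(row)
--     if not fields:
--         raise MappingTableIntakeException('Did not find any fields on row %s' % row)
--     ordered = sorted(fields)
--     if _has_adjacent_dup(ordered):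
--         raise MappingTableIntakeException('Found duplicate field in %s' % row)
--     return fields
-- ===== Notes on version B (the rewrite author's own statement) =====
-- stated objective: alternative
-- what changed: B detects duplicates by sorting a copy and scanning adjacent pairs instead of A's incremental dict with per-element membership tests, and returns the row itself (which equals A's keys once duplicate-free).
import Mathlib
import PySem

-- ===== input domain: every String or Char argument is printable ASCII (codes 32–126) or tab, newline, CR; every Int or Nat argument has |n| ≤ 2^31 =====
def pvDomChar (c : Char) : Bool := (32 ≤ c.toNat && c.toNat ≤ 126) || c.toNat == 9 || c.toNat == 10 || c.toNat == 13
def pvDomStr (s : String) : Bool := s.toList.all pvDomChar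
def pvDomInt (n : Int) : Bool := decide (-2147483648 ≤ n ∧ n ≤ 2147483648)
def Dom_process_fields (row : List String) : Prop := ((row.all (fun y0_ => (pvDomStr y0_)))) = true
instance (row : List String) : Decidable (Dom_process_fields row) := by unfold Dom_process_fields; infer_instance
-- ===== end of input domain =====

-- B detects duplicates by sorting a copy and scanning adjacent pairs, then returns the
-- row itself, instead of A's incremental dict with membership tests (objective: alternative).

-- ===== PORT A =====
-- the for-loop of A: inserts each name, `none` models the duplicate-field raise
def pfLoop (fields : PySem.Dict String Bool) : List String → Option (PySem.Dict String Bool)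
  | [] => some fields
  | name :: rest =>
      if fields.contains name = false then pfLoop (fields.insert name true) rest
      else none

def process_fields (row : List String) : List String :=
  match pfLoop PySem.Dict.empty row with
  | none => []                                  -- raise: duplicate field (outside Pre_)
  | some fields =>
      if fields.size = 0 then []                -- raise: no fields (outside Pre_)
      else fields.keys

-- ===== PORT B =====
-- the zip(ordered, ordered[1:]) scan of _has_adjacent_dup
def hasAdjDup : List String → Bool
  | a :: b :: rest => a == b || hasAdjDup (b :: rest)
  | _ => false

def process_fields_alt (row : List String) : List String :=
  let fields := row
  if fields = [] then []                        -- raise: no fields (outside Pre_)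
  else
    let ordered := PySem.List.sorted fields (fun x => x) false
    if hasAdjDup ordered then []                -- raise: duplicate field (outside Pre_)
    else fields

-- ===== PRECONDITION & SPEC =====
-- A raises MappingTableIntakeException on an empty row and on a row with a duplicate
-- field; Pre_ admits exactly the rows on which A returns normally.
def Pre_process_fields (row : List String) : Prop := row ≠ [] ∧ row.Nodup
instance (row : List String) : Decidable (Pre_process_fields row) := by unfold Pre_process_fields; infer_instance
def pvWitness_process_fields : List String := ["field_name", "field_type"]
def Spec_process_fields (row : List String) (out : List String) : Prop := out = process_fields_alt row
instance (row : List String) (out : List String) : Decidable (Spec_process_fields row out) := by unfold Spec_process_fields; infer_instance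

-- ===== CLAIM (what is proved, stated in full; the proofs are below) =====
def Claim_equal_process_fields : Prop := ∀ (row : List String), Dom_process_fields row → Pre_process_fields row → Spec_process_fields row (process_fields row)

-- ===== LEMMAS AND PROOFS =====

-- A's loop on a duplicate-free row of fresh names succeeds and appends the row to the keys
theorem pfLoop_nodup_fresh (row : List String) : ∀ (d : PySem.Dict String Bool),
    row.Nodup → (∀ x ∈ row, d.contains x = false) →
    pfLoop d row = some (PySem.Dict.mk (d.items ++ row.map (fun n => (n, true)))) := by
  induction row with
  | nil => intro d _ _; simp [pfLoop]
  | cons n rest ih =>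
    intro d hnd hfresh
    have hn : d.contains n = false := hfresh n (by simp)
    simp only [pfLoop, hn]
    rw [ih (d.insert n true) (List.nodup_cons.mp hnd).2]
    · have hitems : (d.insert n true).items = d.items ++ [(n, true)] :=
        PySem.Dict.items_insert_of_not_contains d true hn
      simp [hitems]
    · intro x hx
      have hxne : x ≠ n := fun h => (List.nodup_cons.mp hnd).1 (h ▸ hx)
      have := hfresh x (by simp [hx])
      simp [PySem.Dict.contains_insert, hxne, this]

-- a duplicate-free list has no equal adjacent pair
theorem hasAdjDup_false (l : List String) (h : l.Nodup) : hasAdjDup l = false := by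
  induction l with
  | nil => simp [hasAdjDup]
  | cons a t ih =>
    cases t with
    | nil => simp [hasAdjDup]
    | cons b t' =>
      have h1 := List.nodup_cons.mp h
      have hab : a ≠ b := fun e => h1.1 (e ▸ List.mem_cons_self ..)
      simp [hasAdjDup, ih h1.2, hab]

theorem process_fields_spec : Claim_equal_process_fields := by
  intro row _ hpre
  obtain ⟨hne, hnd⟩ := hpre
  unfold Spec_process_fields process_fields process_fields_alt
  rw [pfLoop_nodup_fresh row PySem.Dict.empty hnd (by intro x _; simp)]
  simp only [PySem.Dict.empty]
  have hordnd : (PySem.List.sorted row (fun x => x) false).Nodup :=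
    (PySem.List.sorted_perm row (fun x => x) false).nodup_iff.mpr hnd
  have hlen : row.length ≠ 0 := by simpa [List.length_eq_zero_iff] using hne
  simp [PySem.Dict.size, PySem.Dict.keys, Function.comp_def, hlen, hne, hasAdjDup_false _ hordnd]
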